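-- pv_equiv track=rewrite | github.com/RohitPoduval1/UMN-Classes | CSCI_1133H/labs/lab7/min_max_num.py | min_max_nums
-- ===== SOURCE A (Python) =====
-- def min_max_nums(words):
--     words = words.split(" ")
--     min_size = len(words[0])
--     max_size = len(words[0])
--     for word in words:
--         if len(word) < min_size:
--             min_size = len(word)
--         elif len(word) > max_size:
--             max_size = len(word)
--     return [min_size, max_size]
-- ===== SOURCE B (Python) =====
-- def min_max_nums(words):
--     lengths = [len(w) for w in words.split(" ")]
--     return [min(lengths), max(lengths)]
-- ===== Notes on version B (the rewrite author's own statement) =====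
-- stated objective: simpler
-- what changed: Replaces the manual accumulate-both loop (with its if/elif state machine) by building the list of word lengths once and delegating the two extrema to the min and max builtins.
import Mathlib
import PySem

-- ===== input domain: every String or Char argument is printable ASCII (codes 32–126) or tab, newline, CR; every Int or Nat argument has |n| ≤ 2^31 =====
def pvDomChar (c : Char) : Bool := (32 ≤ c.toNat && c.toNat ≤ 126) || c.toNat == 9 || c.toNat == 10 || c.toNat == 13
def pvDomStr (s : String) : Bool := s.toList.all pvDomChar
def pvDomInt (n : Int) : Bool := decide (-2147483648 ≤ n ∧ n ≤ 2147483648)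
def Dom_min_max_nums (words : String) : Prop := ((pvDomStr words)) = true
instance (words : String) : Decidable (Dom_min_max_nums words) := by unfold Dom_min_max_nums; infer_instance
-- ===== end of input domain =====

-- B replaces A's manual if/elif accumulate-both loop with a list of word lengths handed to min/max (objective: simpler).

-- ===== PORT A =====
def min_max_nums (words : String) : List Int :=
  match PySem.Str.split? words " " with      -- words.split(" "); sep is non-empty so this never raises
  | none => []
  | some ws =>
  match PySem.List.pyGet? ws 0 with          -- words[0]; split(" ") never yields [], so this never raises
  | none => []
  | some w0 =>
    let mn0 : Int := PySem.Str.len w0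
    let mx0 : Int := PySem.Str.len w0
    let p := ws.foldl (fun (p : Int × Int) w =>
        if PySem.Str.len w < p.1 then (PySem.Str.len w, p.2)
        else if PySem.Str.len w > p.2 then (p.1, PySem.Str.len w)
        else p) (mn0, mx0)
    [p.1, p.2]

-- ===== PORT B =====
def min_max_nums_alt (words : String) : List Int :=
  match PySem.Str.split? words " " with      -- words.split(" "); sep is non-empty so this never raises
  | none => []
  | some ws =>
    let lengths := ws.map (fun w => PySem.Str.len w)
    match PySem.List.min? lengths (fun x => x), PySem.List.max? lengths (fun x => x) with
    | some a, some b => [a, b]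
    | _, _ => []                              -- unreachable: split(" ") never yields []

-- ===== PRECONDITION & SPEC =====
def Spec_min_max_nums (words : String) (out : List Int) : Prop := out = min_max_nums_alt words
instance (words : String) (out : List Int) : Decidable (Spec_min_max_nums words out) := by unfold Spec_min_max_nums; infer_instance

-- ===== CLAIM (what is proved, stated in full; the proofs are below) =====
def Claim_equal_min_max_nums : Prop := ∀ (words : String), Dom_min_max_nums words → Spec_min_max_nums words (min_max_nums words)

-- ===== LEMMAS AND PROOFS =====

-- A's combined loop body, named for the proofs
def pvStep (p : Int × Int) (x : Int) : Int × Int :=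
  if x < p.1 then (x, p.2) else if x > p.2 then (p.1, x) else p

-- the combined fold computes the two independent folds, as long as the state is ordered
theorem pvStep_foldl (L : List Int) : ∀ (mn mx : Int), mn ≤ mx →
    L.foldl pvStep (mn, mx) = (L.foldl min mn, L.foldl max mx) := by
  induction L with
  | nil => intro mn mx _; simp
  | cons x t ih =>
    intro mn mx h
    simp only [List.foldl_cons]
    have hs : pvStep (mn, mx) x = (min mn x, max mx x) := by
      unfold pvStep; split_ifs with h1 h2 <;> simp <;> omega
    rw [hs, ih _ _ (by omega)]

-- folding A's step over strings is folding it over their lengths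
theorem pvStep_foldl_map (ws : List String) (p : Int × Int) :
    ws.foldl (fun (p : Int × Int) w =>
        if PySem.Str.len w < p.1 then (PySem.Str.len w, p.2)
        else if PySem.Str.len w > p.2 then (p.1, PySem.Str.len w)
        else p) p = (ws.map (fun w => PySem.Str.len w)).foldl pvStep p := by
  rw [List.foldl_map]; rfl

-- ===== VERDICT (by name: the statement is the Claim_ definition above) =====
theorem min_max_nums_spec : Claim_equal_min_max_nums := by
  intro words _
  unfold Spec_min_max_nums min_max_nums min_max_nums_alt
  obtain ⟨ws, hws⟩ : ∃ ws, PySem.Str.split? words " " = some ws := by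
    simp [PySem.Str.split?, PySem.Chars.split?]
  rw [hws]
  cases ws with
  | nil => simp [PySem.List.pyGet?, PySem.List.pyIdx?, PySem.List.min?, PySem.List.max?]
  | cons w0 t =>
    have h0 : PySem.List.pyGet? (w0 :: t) (0 : Int) = some w0 := by
      simp [PySem.List.pyGet?, PySem.List.pyIdx?]
    dsimp only
    rw [h0]
    simp only [pvStep_foldl_map, List.map_cons, List.foldl_cons,
      PySem.List.min?_id_cons, PySem.List.max?_id_cons]
    simp only [lt_irrefl, if_false]
    rw [pvStep_foldl _ _ _ le_rfl]
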